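-- pv_equiv track=rewrite | github.com/DevilCoders/Yandex | tools/snipmake/steam/page_factors/applicator.py | adjacent_nodes
-- ===== SOURCE A (Python) =====
-- def adjacent_nodes(tree):
--     def nodes_seq(tree_dict, cur_node):
--         for node in tree_dict[cur_node]:
--             if node in tree_dict:
--                 for got_node in nodes_seq(tree_dict, node):
--                     yield got_node
--             else:
--                 yield node
--
--     tree_dict = dict(tree)
--     prev_node = None
--     for node in nodes_seq(tree_dict, tree[0][0]):
--         if prev_node is not None:
--             yield prev_node, node
--         prev_node = node
-- ===== SOURCE B (Python) =====
-- def adjacent_nodes(tree):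
--     d = dict(tree)
--     seq = [tree[0][0]]
--     for _ in range(len(tree)):
--         seq = [y for x in seq for y in (d[x] if x in d else [x])]
--     return list(zip(seq, seq[1:]))
-- ===== Notes on version B (the rewrite author's own statement) =====
-- stated objective: alternative
-- what changed: Replaces A's recursive depth-first leaf generator with len(tree) rounds of parallel one-level expansion of the node sequence starting from the root, then zips the resulting leaf list with its tail to form the adjacent pairs.
import Mathlib
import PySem

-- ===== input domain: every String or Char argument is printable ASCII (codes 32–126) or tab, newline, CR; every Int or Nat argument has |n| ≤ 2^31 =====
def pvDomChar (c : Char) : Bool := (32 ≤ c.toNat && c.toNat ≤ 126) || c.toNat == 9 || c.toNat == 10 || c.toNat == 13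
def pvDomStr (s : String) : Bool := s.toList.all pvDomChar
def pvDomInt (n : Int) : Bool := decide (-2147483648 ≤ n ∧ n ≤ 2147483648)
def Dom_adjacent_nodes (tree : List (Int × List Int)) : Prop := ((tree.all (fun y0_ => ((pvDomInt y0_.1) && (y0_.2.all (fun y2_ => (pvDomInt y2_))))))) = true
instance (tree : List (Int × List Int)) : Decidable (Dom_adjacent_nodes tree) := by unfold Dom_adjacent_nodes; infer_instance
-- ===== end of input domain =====

-- B replaces A's recursive depth-first leaf generator by len(tree) rounds of
-- parallel one-level expansion of the node sequence, then zips the leaf list with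
-- its tail (alternative decomposition; return value only — both are generators in
-- Python, compared as the list of yielded pairs).

-- ===== PORT A =====
-- nodes_seq: recursive generator; fuel = recursion depth.  Under Pre_ (no key
-- reachable from the root lies on a cycle) the depth is bounded by tree.length,
-- so the fuel branch `0 => []` is never reached on admitted inputs (proved below).
def nodesSeqA (d : PySem.Dict Int (List Int)) : Nat → Int → List Int
  | 0, _ => []
  | f + 1, cur =>
      (d.getD cur []).flatMap (fun n =>
        if d.contains n then nodesSeqA d f n else [n])

def adjacent_nodes (tree : List (Int × List Int)) : List (Int × Int) :=
  match PySem.List.pyGet? tree 0 with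
  | none => []      -- tree[0] raises IndexError: excluded by Pre_
  | some r =>
      let d := PySem.Dict.ofList tree
      -- 'prev_node = None; for node in …: if prev_node is not None: yield …'
      ((nodesSeqA d tree.length r.1).foldl
        (fun (acc : List (Int × Int) × Option Int) node =>
          ((match acc.2 with
            | some p => acc.1 ++ [(p, node)]
            | none => acc.1), some node))
        ([], none)).1

-- ===== PORT B =====
def stepB (d : PySem.Dict Int (List Int)) (seq : List Int) : List Int :=
  seq.flatMap (fun x => match d.get? x with | some cs => cs | none => [x])

def adjacent_nodes_alt (tree : List (Int × List Int)) : List (Int × Int) :=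
  match PySem.List.pyGet? tree 0 with
  | none => []      -- tree[0] raises IndexError: excluded by Pre_
  | some r =>
      let d := PySem.Dict.ofList tree
      let seq := (List.range tree.length).foldl (fun s _ => stepB d s) [r.1]
      seq.zip seq.tail   -- zip(seq, seq[1:]); seq[1:] of a list is its tail

-- ===== PRECONDITION & SPEC =====
-- Helpers for Pre_: the key-successor relation of the input graph and its
-- bounded reachability closure (a property of the input, used by no port).
def keySucc1 (g : PySem.Dict Int (List Int)) (a : Int) : List Int :=
  (g.getD a []).filter (fun c => g.contains c)

def reachStep (g : PySem.Dict Int (List Int)) (s : List Int) : List Int :=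
  PySem.Set.update s (s.flatMap (keySucc1 g))

def reachN (g : PySem.Dict Int (List Int)) : Nat → List Int → List Int
  | 0, s => s
  | n + 1, s => reachN g n (reachStep g s)

-- Pre_ admits the non-empty trees on which no key reachable from the root lies
-- on a cycle of the key graph (bounded closures suffice: any cycle or access
-- path repeats no key).  On the excluded non-empty inputs A does not return:
-- nodes_seq recurses forever.  The empty tree raises IndexError at tree[0][0].
def Pre_adjacent_nodes (tree : List (Int × List Int)) : Prop :=
  tree ≠ [] ∧
  ∀ k ∈ reachN (PySem.Dict.ofList tree) tree.length [tree.headI.1],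
    (PySem.Dict.ofList tree).contains k = true →
      k ∉ reachN (PySem.Dict.ofList tree) tree.length (keySucc1 (PySem.Dict.ofList tree) k)
instance (tree : List (Int × List Int)) : Decidable (Pre_adjacent_nodes tree) := by
  unfold Pre_adjacent_nodes; infer_instance

def pvWitness_adjacent_nodes : (List (Int × List Int)) := [(0, [1, 2])]

def Spec_adjacent_nodes (tree : List (Int × List Int)) (out : List (Int × Int)) : Prop := out = adjacent_nodes_alt tree
instance (tree : List (Int × List Int)) (out : List (Int × Int)) : Decidable (Spec_adjacent_nodes tree out) := by unfold Spec_adjacent_nodes; infer_instance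

-- ===== CLAIM (what is proved, stated in full; the proofs are below) =====
def Claim_equal_adjacent_nodes : Prop := ∀ (tree : List (Int × List Int)), Dom_adjacent_nodes tree → Pre_adjacent_nodes tree → Spec_adjacent_nodes tree (adjacent_nodes tree)

-- ===== LEMMAS AND PROOFS =====

-- Full one-level-parallel expansion to depth f (keys not yet expanded remain).
def expandE (d : PySem.Dict Int (List Int)) : Nat → Int → List Int
  | 0, c => [c]
  | f + 1, c =>
      match d.get? c with
      | some cs => cs.flatMap (expandE d f)
      | none => [c]

theorem expandE_leaf (d : PySem.Dict Int (List Int)) (f : Nat) (n : Int)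
    (h : d.get? n = none) : expandE d f n = [n] := by
  cases f with
  | zero => rfl
  | succ f => simp [expandE, h]

theorem stepB_expandE (d : PySem.Dict Int (List Int)) (f : Nat) (c : Int) :
    stepB d (expandE d f c) = expandE d (f + 1) c := by
  induction f generalizing c with
  | zero =>
      cases h : d.get? c with
      | none => simp [expandE, stepB, h]
      | some cs => simp [expandE, stepB, h, List.flatMap_singleton']
  | succ f ih =>
      cases h : d.get? c with
      | none => simp [expandE, stepB, h]
      | some cs =>
          simp only [expandE, h, stepB, List.flatMap_assoc]
          exact List.flatMap_congr (fun n _ => ih n)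

theorem foldl_range_stepB (d : PySem.Dict Int (List Int)) (c : Int) (n : Nat) :
    (List.range n).foldl (fun s _ => stepB d s) [c] = expandE d n c := by
  induction n with
  | zero => rfl
  | succ n ih =>
      rw [List.range_succ, List.foldl_append]
      simp [ih, stepB_expandE]

-- Reachability toolkit for the termination bound.
theorem subset_reachStep (g : PySem.Dict Int (List Int)) (s : List Int) :
    s ⊆ reachStep g s := by
  intro x hx
  exact (PySem.Set.mem_update s (s.flatMap (keySucc1 g)) x).2 (Or.inl hx)

theorem subset_reachN (g : PySem.Dict Int (List Int)) (f : Nat) (s : List Int) :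
    s ⊆ reachN g f s := by
  induction f generalizing s with
  | zero => exact fun x hx => hx
  | succ f ih => exact fun x hx => ih (reachStep g s) (subset_reachStep g s hx)

theorem reachN_reachN (g : PySem.Dict Int (List Int)) (m n : Nat) (s : List Int) :
    reachN g m (reachN g n s) = reachN g (n + m) s := by
  induction n generalizing s with
  | zero => rw [Nat.zero_add]; rfl
  | succ n ih =>
      show reachN g m (reachN g n (reachStep g s)) = reachN g (n + 1 + m) s
      rw [ih (reachStep g s)]
      have h : n + 1 + m = (n + m) + 1 := by omega
      rw [h]
      rfl

theorem reachN_fuel_le (g : PySem.Dict Int (List Int)) {f f' : Nat} (h : f ≤ f')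
    (s : List Int) : reachN g f s ⊆ reachN g f' s := by
  obtain ⟨e, he⟩ := Nat.exists_eq_add_of_le h
  subst he
  rw [← reachN_reachN g e f s]
  exact subset_reachN g e (reachN g f s)

theorem reachN_step (g : PySem.Dict Int (List Int)) {a b : Int}
    (hb : b ∈ keySucc1 g a) :
    ∀ (f : Nat) (s : List Int), a ∈ reachN g f s → b ∈ reachN g (f + 1) s := by
  intro f
  induction f with
  | zero =>
      intro s ha
      show b ∈ reachStep g s
      exact (PySem.Set.mem_update s (s.flatMap (keySucc1 g)) b).2
        (Or.inr (List.mem_flatMap.2 ⟨a, ha, hb⟩))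
  | succ f ih =>
      intro s ha
      exact ih (reachStep g s) ha

theorem keys_ofList (tree : List (Int × List Int)) :
    (PySem.Dict.ofList tree).keys = PySem.Set.ofList (tree.map Prod.fst) := by
  have h := PySem.Dict.keys_foldl_insert_key (κ := Int) (ν := List Int) tree Prod.fst
      (fun d x => x.2) PySem.Dict.empty
  simpa [PySem.Dict.ofList, PySem.Dict.update, PySem.Dict.keys_empty,
    PySem.Set.update_nil_left] using h

theorem keys_length_le (tree : List (Int × List Int)) :
    (PySem.Dict.ofList tree).keys.length ≤ tree.length := by
  rw [keys_ofList]
  calc (PySem.Set.ofList (tree.map Prod.fst)).length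
      ≤ (tree.map Prod.fst).length := PySem.Set.length_ofList_le _
    _ = tree.length := by simp

-- The main bridge: on admitted inputs A's depth-first sequence at fuel f equals
-- full parallel expansion at depth f, whenever the fuel dominates tree.length
-- minus the length of the (duplicate-free) access path q leading to c.
theorem nodesSeqA_eq_expandE (tree : List (Int × List Int)) (root : Int)
    (hacyc : ∀ k ∈ reachN (PySem.Dict.ofList tree) tree.length [root],
      (PySem.Dict.ofList tree).contains k = true →
        k ∉ reachN (PySem.Dict.ofList tree) tree.length
          (keySucc1 (PySem.Dict.ofList tree) k)) :
    ∀ (f : Nat) (q : List Int) (c : Int),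
      (q ++ [c]).Nodup →
      (∀ x ∈ q ++ [c], (PySem.Dict.ofList tree).contains x = true) →
      c ∈ reachN (PySem.Dict.ofList tree) q.length [root] →
      (∀ x ∈ q, c ∈ reachN (PySem.Dict.ofList tree) q.length
        (keySucc1 (PySem.Dict.ofList tree) x)) →
      tree.length ≤ f + q.length →
      nodesSeqA (PySem.Dict.ofList tree) f c = expandE (PySem.Dict.ofList tree) f c := by
  set g := PySem.Dict.ofList tree with hg
  have hkeyslen : g.keys.length ≤ tree.length := keys_length_le tree
  have hpathlen : ∀ (q : List Int) (c : Int), (q ++ [c]).Nodup →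
      (∀ x ∈ q ++ [c], g.contains x = true) → q.length + 1 ≤ tree.length := by
    intro q c hnd hks
    have hsub : (q ++ [c]) ⊆ g.keys := by
      intro x hx
      exact (PySem.Dict.contains_iff_mem_keys g x).1 (hks x hx)
    have := (List.subperm_of_subset hnd hsub).length_le
    simp only [List.length_append, List.length_cons, List.length_nil] at this
    omega
  intro f
  induction f with
  | zero =>
      intro q c hnd hks _ _ hfuel
      have := hpathlen q c hnd hks
      omega
  | succ f ih =>
      intro q c hnd hks hroot hreach hfuel
      have hkeyc : g.contains c = true := hks c (by simp)
      obtain ⟨cs, hget⟩ : ∃ cs, g.get? c = some cs := by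
        rcases h : g.get? c with _ | cs
        · rw [PySem.Dict.contains_eq_isSome_get?, h] at hkeyc
          exact absurd hkeyc (by simp)
        · exact ⟨cs, rfl⟩
      have hgetD : g.getD c [] = cs := by simp [PySem.Dict.getD, hget]
      simp only [nodesSeqA, expandE, hget, hgetD]
      refine List.flatMap_congr (fun n hn => ?_)
      by_cases hc : g.contains n = true
      · -- n is a key child: recurse along the extended path q ++ [c]
        have hedge : n ∈ keySucc1 g c := by
          rw [keySucc1, List.mem_filter, hgetD]
          exact ⟨hn, hc⟩
        have hqlen := hpathlen q c hnd hks
        -- n cannot already occur on the path: that would close a cycle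
        have hnew : n ∉ q ++ [c] := by
          intro hmem
          have hnroot : n ∈ reachN g tree.length [root] := by
            have h1 : n ∈ reachN g (q.length + 1) [root] := reachN_step g hedge q.length [root] hroot
            exact reachN_fuel_le g (by omega) [root] h1
          have hself : n ∈ reachN g tree.length (keySucc1 g n) := by
            rcases List.mem_append.1 hmem with hq | hc'
            · have h1 : c ∈ reachN g q.length (keySucc1 g n) := hreach n hq
              have h2 : n ∈ reachN g (q.length + 1) (keySucc1 g n) :=
                reachN_step g hedge q.length (keySucc1 g n) h1
              exact reachN_fuel_le g (by omega) (keySucc1 g n) h2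
            · have hcn : n = c := by simpa using hc'
              rw [← hcn] at hedge
              exact reachN_fuel_le g (Nat.zero_le _) (keySucc1 g n)
                (subset_reachN g 0 (keySucc1 g n) hedge)
          exact hacyc n hnroot hc hself
        rw [if_pos hc]
        refine ih (q ++ [c]) n ?_ ?_ ?_ ?_ (by simp; omega)
        · rw [List.nodup_append]
          refine ⟨hnd, List.nodup_singleton n, ?_⟩
          intro a ha b hb
          simp only [List.mem_singleton] at hb
          subst hb
          exact fun he => hnew (he ▸ ha)
        · intro x hx
          rcases List.mem_append.1 hx with h | h
          · exact hks x h
          · have : x = n := by simpa using h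
            exact this ▸ hc
        · simp only [List.length_append, List.length_cons, List.length_nil]
          exact reachN_step g hedge q.length [root] hroot
        · intro x hx
          simp only [List.length_append, List.length_cons, List.length_nil]
          rcases List.mem_append.1 hx with hq | hc'
          · exact reachN_step g hedge q.length (keySucc1 g x) (hreach x hq)
          · have hxc : x = c := by simpa using hc'
            rw [hxc]
            exact reachN_fuel_le g (by omega) (keySucc1 g c)
              (subset_reachN g 0 (keySucc1 g c) hedge)
      · -- n is a leaf
        have hnone : g.get? n = none := by
          rcases h : g.get? n with _ | v
          · rfl
          · exfalso
            exact hc (by rw [PySem.Dict.contains_eq_isSome_get?, h]; rfl)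
        rw [if_neg hc, expandE_leaf g f n hnone]

theorem pairs_foldl (l : List Int) (acc : List (Int × Int)) (p : Int) :
    (l.foldl (fun (a : List (Int × Int) × Option Int) node =>
        ((match a.2 with
          | some q => a.1 ++ [(q, node)]
          | none => a.1), some node)) (acc, some p)).1
      = acc ++ (p :: l).zip l := by
  induction l generalizing acc p with
  | nil => simp
  | cons h t ih =>
      simp only [List.foldl_cons, List.zip_cons_cons]
      rw [ih]
      simp

theorem pairs_stream (x : Int) (xs : List Int) :
    ((x :: xs).foldl (fun (a : List (Int × Int) × Option Int) node =>
        ((match a.2 with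
          | some q => a.1 ++ [(q, node)]
          | none => a.1), some node)) ([], none)).1
      = (x :: xs).zip (x :: xs).tail := by
  rw [List.foldl_cons]
  exact pairs_foldl xs [] x

-- ===== VERDICT (by name: the statement is the Claim_ definition above) =====
theorem adjacent_nodes_spec : Claim_equal_adjacent_nodes := by
  intro tree _ hpre
  obtain ⟨hne, hacyc⟩ := hpre
  unfold Spec_adjacent_nodes
  cases htree : tree with
  | nil => exact absurd htree hne
  | cons hd tl =>
      subst htree
      obtain ⟨c0, cs0⟩ := hd
      have hget0 : PySem.List.pyGet? ((c0, cs0) :: tl) (0 : Int) = some (c0, cs0) := by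
        simp [PySem.List.pyGet?, PySem.List.pyIdx?]
      unfold adjacent_nodes adjacent_nodes_alt
      rw [hget0]
      simp only
      set tree := (c0, cs0) :: tl with htree
      set g := PySem.Dict.ofList tree with hgdef
      have hroot : tree.headI.1 = c0 := rfl
      rw [hroot] at hacyc
      have hkeyroot : g.contains c0 = true := by
        rw [PySem.Dict.contains_iff_mem_keys g c0, keys_ofList]
        exact (PySem.Set.mem_ofList _ _).2 (by simp [htree])
      have hseq : nodesSeqA g tree.length c0 = expandE g tree.length c0 := by
        refine nodesSeqA_eq_expandE tree c0 hacyc tree.length [] c0 ?_ ?_ ?_ ?_ ?_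
        · simp
        · intro x hx
          have : x = c0 := by simpa using hx
          exact this ▸ hkeyroot
        · simp [reachN]
        · intro x hx; simp at hx
        · simp
      rw [foldl_range_stepB, hseq]
      cases hE : expandE g tree.length c0 with
      | nil => simp
      | cons x xs => exact pairs_stream x xs
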